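-- pv_equiv track=rewrite | github.com/MrChepe09/Competitive-Programming-Codes | A2OJ/Ladder 0-1300/sale.py | sale
-- ===== SOURCE A (Python) =====
-- def sale(n, m, a):
--     a.sort()
--     c = 0
--     res = 0
--     for i in a:
--         if(c==m):
--             break
--         if(i<0):
--             res += abs(i)
--             c+=1
--     return res
-- ===== SOURCE B (Python) =====
-- def sale(n, m, a):
--     negs = [x for x in a if x < 0]
--     total = 0
--     c = 0
--     while c != m and negs:
--         v = min(negs)
--         negs.remove(v)
--         total -= v
--         c += 1
--     return total
-- ===== Notes on version B (the rewrite author's own statement) =====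
-- stated objective: alternative
-- what changed: B never sorts: it filters the negatives and then selects the m smallest by repeated minimum extraction (min + remove in a while loop), instead of A's full sort followed by a counted scan with break.
import Mathlib
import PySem

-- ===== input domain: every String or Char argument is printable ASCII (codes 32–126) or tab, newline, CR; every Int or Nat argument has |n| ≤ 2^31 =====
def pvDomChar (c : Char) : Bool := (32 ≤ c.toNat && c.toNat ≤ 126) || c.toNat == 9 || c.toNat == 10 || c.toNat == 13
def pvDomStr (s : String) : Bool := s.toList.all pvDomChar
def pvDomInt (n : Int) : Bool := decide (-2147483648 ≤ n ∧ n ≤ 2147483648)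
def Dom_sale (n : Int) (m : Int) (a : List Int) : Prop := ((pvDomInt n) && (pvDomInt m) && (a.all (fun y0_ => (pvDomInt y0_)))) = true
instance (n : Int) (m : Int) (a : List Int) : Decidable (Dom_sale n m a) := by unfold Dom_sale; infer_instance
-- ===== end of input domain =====

-- B selects the m smallest negatives by repeated minimum extraction (no sort); A sorts `a`
-- in place (a mutation this equivalence about the return value does not cover).


-- ===== PORT A =====
-- A's for-loop with `break`: state (c, res); `break` returns res immediately.
def saleLoop (m : Int) : List Int → Int → Int → Int
  | [], _, res => res
  | i :: t, c, res =>
      if c = m then res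
      else if i < 0 then saleLoop m t (c + 1) (res + |i|)
      else saleLoop m t c res

def sale (n : Int) (m : Int) (a : List Int) : Int :=
  saleLoop m (PySem.List.sorted a (fun x => x)) 0 0

-- ===== PORT B =====
-- B's while loop: while c != m and negs: extract min, remove it, accumulate.
-- The `none` branches are unreachable (negs ≠ [] in the else branch, and min(negs) ∈ negs).
def saleAltLoop (m : Int) (c : Int) (total : Int) (negs : List Int) : Int :=
  if c = m ∨ negs = [] then total
  else
    match hv : PySem.List.min? negs (fun x => x) with
    | none => total
    | some v =>
      match hr : PySem.List.remove? negs v with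
      | none => total
      | some rest => saleAltLoop m (c + 1) (total - v) rest
termination_by negs.length
decreasing_by
  have hvmem := PySem.List.min?_mem hv
  rw [PySem.List.remove?_eq_some_erase negs v hvmem] at hr
  cases hr
  have h1 := List.length_erase_of_mem hvmem
  have h2 := List.length_pos_of_mem hvmem
  omega

def sale_alt (n : Int) (m : Int) (a : List Int) : Int :=
  saleAltLoop m 0 0 (a.filter (fun x => decide (x < 0)))

-- ===== PRECONDITION & SPEC =====
def Spec_sale (n : Int) (m : Int) (a : List Int) (out : Int) : Prop := out = sale_alt n m a
instance (n : Int) (m : Int) (a : List Int) (out : Int) : Decidable (Spec_sale n m a out) := by unfold Spec_sale; infer_instance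

-- ===== CLAIM (what is proved, stated in full; the proofs are below) =====
def Claim_equal_sale : Prop := ∀ (n : Int) (m : Int) (a : List Int), Dom_sale n m a → Spec_sale n m a (sale n m a)

-- ===== LEMMAS AND PROOFS =====

-- A's loop ignores a tail of non-negative elements.
theorem saleLoop_nonneg (m : Int) (q : List Int) (hq : ∀ x ∈ q, ¬ x < 0) :
    ∀ (c res : Int), saleLoop m q c res = res := by
  induction q with
  | nil => intro c res; rfl
  | cons i t ih =>
      intro c res
      have hi : ¬ i < 0 := hq i (by simp)
      have ht : ∀ x ∈ t, ¬ x < 0 := fun x hx => hq x (by simp [hx])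
      simp only [saleLoop, if_neg hi]
      split_ifs with h
      · rfl
      · exact ih ht c res

theorem saleLoop_append_nonneg (m : Int) (q : List Int) (hq : ∀ x ∈ q, ¬ x < 0) :
    ∀ (p : List Int) (c res : Int), saleLoop m (p ++ q) c res = saleLoop m p c res := by
  intro p
  induction p with
  | nil => intro c res; simpa [saleLoop] using saleLoop_nonneg m q hq c res
  | cons i t ih =>
      intro c res
      simp only [List.cons_append, saleLoop]
      split_ifs with h h'
      · rfl
      · exact ih (c + 1) (res + |i|)
      · exact ih c res

-- sorted(a) = sorted(negatives of a) ++ sorted(non-negatives of a).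
theorem sorted_split (a : List Int) :
    PySem.List.sorted a (fun x => x) =
      PySem.List.sorted (a.filter (fun x => decide (x < 0))) (fun x => x) ++
      PySem.List.sorted (a.filter (fun x => !decide (x < 0))) (fun x => x) := by
  apply PySem.List.sorted_id_eq_of_perm_of_pairwise
  · refine List.Perm.trans
      (List.Perm.append (PySem.List.sorted_perm _ _ _) (PySem.List.sorted_perm _ _ _)) ?_
    exact List.filter_append_perm (fun x => decide (x < 0)) a
  · apply List.pairwise_append.mpr
    refine ⟨PySem.List.sorted_pairwise _ _, PySem.List.sorted_pairwise _ _, ?_⟩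
    intro x hx y hy
    have hx' : x < 0 := by
      have := (PySem.List.mem_sorted _ _ _ x).mp hx
      simpa using (List.mem_filter.mp this).2
    have hy' : ¬ y < 0 := by
      have := (PySem.List.mem_sorted _ _ _ y).mp hy
      simpa using (List.mem_filter.mp this).2
    omega

-- Core: A's counted scan over sorted(negs) computes the same value as B's
-- repeated-min-extraction loop over negs, for any all-negative list negs.
theorem saleLoop_sorted_eq_altLoop (m : Int) :
    ∀ (k : Nat) (negs : List Int), negs.length ≤ k → (∀ x ∈ negs, x < 0) →
      ∀ (c total : Int),
        saleLoop m (PySem.List.sorted negs (fun x => x)) c total = saleAltLoop m c total negs := by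
  intro k
  induction k with
  | zero =>
      intro negs hlen _ c total
      have : negs = [] := List.eq_nil_of_length_eq_zero (Nat.le_zero.mp hlen)
      subst this
      rw [saleAltLoop]
      simp [PySem.List.sorted, saleLoop]
  | succ k ih =>
      intro negs hlen hneg c total
      by_cases hnil : negs = []
      · subst hnil
        rw [saleAltLoop]
        simp [PySem.List.sorted, saleLoop]
      · obtain ⟨v, t, hs⟩ : ∃ v t, PySem.List.sorted negs (fun x => x) = v :: t := by
          cases hsort : PySem.List.sorted negs (fun x => x) with
          | nil => exact absurd ((PySem.List.sorted_eq_nil_iff _ _ _).mp hsort) hnil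
          | cons v t => exact ⟨v, t, rfl⟩
        have hperm : (v :: t).Perm negs := hs ▸ PySem.List.sorted_perm negs (fun x => x) false
        have hvmem : v ∈ negs := hperm.mem_iff.mp (by simp)
        have hvneg : v < 0 := hneg v hvmem
        -- min? negs returns the value v (head of sorted negs)
        obtain ⟨w, hw⟩ : ∃ w, PySem.List.min? negs (fun x => x) = some w := by
          cases hmin : PySem.List.min? negs (fun x => x) with
          | none => exact absurd ((PySem.List.min?_eq_none_iff negs (fun x => x)).mp hmin) hnil
          | some w => exact ⟨w, rfl⟩
        have hwmem : w ∈ negs := PySem.List.min?_mem hw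
        have hwv : w = v := by
          have h1 : w ≤ v := PySem.List.min?_isMin hw v hvmem
          have h2 : v ≤ w := PySem.List.key_head_sorted_le negs (fun x => x) hs w hwmem
          omega
        -- removing v from negs leaves a list whose sort is t
        have hrem : PySem.List.remove? negs v = some (negs.erase v) :=
          PySem.List.remove?_eq_some_erase negs v hvmem
        have herase : PySem.List.sorted (negs.erase v) (fun x => x) = t := by
          apply PySem.List.sorted_id_eq_of_perm_of_pairwise
          · exact ((hperm.erase v).symm.trans (by simp)).symm
          · exact (PySem.List.sorted_pairwise negs (fun x => x)).sublist
              (hs ▸ List.sublist_cons_self v t)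
        have hlent : (negs.erase v).length ≤ k := by
          have := List.length_erase_of_mem hvmem
          omega
        have hnegt : ∀ x ∈ negs.erase v, x < 0 := fun x hx =>
          hneg x (List.mem_of_mem_erase hx)
        rw [hwv] at hw
        by_cases hc : c = m
        · rw [hs]
          rw [saleAltLoop, if_pos (Or.inl hc)]
          simp [saleLoop, hc]
        · rw [hs]
          rw [saleAltLoop, if_neg (by simp [hc, hnil])]
          split
          · next h => rw [hw] at h; cases h
          · next w' h =>
              rw [hw] at h
              injection h with h
              subst h
              split
              · next h2 => rw [hrem] at h2; cases h2
              · next rest h2 =>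
                  rw [hrem] at h2
                  injection h2 with h2
                  subst h2
                  have habs : total + |v| = total - v := by rw [abs_of_neg hvneg]; ring
                  rw [saleLoop, if_neg hc, if_pos hvneg, habs, ← herase]
                  exact ih (negs.erase v) hlent hnegt (c + 1) (total - v)

-- ===== VERDICT (by name: the statement is the Claim_ definition above) =====
theorem sale_spec : Claim_equal_sale := by
  intro n m a _
  unfold Spec_sale sale sale_alt
  rw [sorted_split a]
  rw [saleLoop_append_nonneg m _ (fun x hx => by
        have := (PySem.List.mem_sorted _ _ _ x).mp hx
        simpa using (List.mem_filter.mp this).2)]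
  exact saleLoop_sorted_eq_altLoop m (a.filter (fun x => decide (x < 0))).length _
    le_rfl (fun x hx => by simpa using (List.mem_filter.mp hx).2) 0 0
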